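-- pv_equiv track=rewrite | github.com/DiVik-htelter/PiTPO | лаб3/lab3_2.py | count_fibonac
-- ===== SOURCE A (Python) =====
-- def count_fibonac(a, b):
--     fib = [0, 1]
--     while fib[-1] <= b: # строим последовательность до б
--         fib.append(fib[-1] + fib[-2])
--
--     count = 0
--     for num in fib:
--         if a <= num <= b: # проверяем сколько чисел в промежутке
--             count += 1
--
--     return count
-- ===== SOURCE B (Python) =====
-- def count_fibonac(a, b):
--     # Answer as a difference of two prefix-rank queries: rank(t) = how many terms
--     # of the sequence 0,1,1,2,3,... are <= t; count in [a,b] = rank(b) - rank(a-1).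
--     def rank(t):
--         k, x, y = 0, 0, 1
--         while x <= t:
--             k, x, y = k + 1, y, x + y
--         return k
--     return 0 if a > b else rank(b) - rank(a - 1)
-- ===== Notes on version B (the rewrite author's own statement) =====
-- stated objective: alternative
-- what changed: Replaces A's build-a-list-then-filter-by-interval with a prefix-rank decomposition: rank(t) counts sequence terms <= t with a scalar loop containing no interval test, and the answer is rank(b) - rank(a-1) (0 for an empty interval).
import Mathlib
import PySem

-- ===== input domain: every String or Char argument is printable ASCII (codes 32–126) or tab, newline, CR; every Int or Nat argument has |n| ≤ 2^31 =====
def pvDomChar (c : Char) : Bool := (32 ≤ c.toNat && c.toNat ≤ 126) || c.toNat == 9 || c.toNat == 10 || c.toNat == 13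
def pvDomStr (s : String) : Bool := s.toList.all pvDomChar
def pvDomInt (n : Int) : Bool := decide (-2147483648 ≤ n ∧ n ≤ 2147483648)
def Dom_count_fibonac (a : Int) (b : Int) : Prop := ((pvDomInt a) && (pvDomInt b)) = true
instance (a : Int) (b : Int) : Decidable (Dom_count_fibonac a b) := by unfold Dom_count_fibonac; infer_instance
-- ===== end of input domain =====

-- B answers with a prefix-rank decomposition rank(b) - rank(a-1) instead of A's
-- build-a-list-then-filter (objective: alternative).

-- ===== PORT A =====
-- A's while-loop builds the list `fib`; x and y carry fib[-2] and fib[-1] (the last two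
-- elements of the list, which the Python loop reads), with the invariants needed for termination.
def count_fibonac_build (a b : Int) (fib : List Int) (x y : Int)
    (hx : 0 ≤ x) (_hxy : x ≤ y) (hy : 1 ≤ y) : List Int :=
  if h : y ≤ b then
    count_fibonac_build a b (fib ++ [x + y]) y (x + y) (by omega) (by omega) (by omega)
  else fib
termination_by (2 * b + 1 - (x + y)).toNat
decreasing_by omega

def count_fibonac (a : Int) (b : Int) : Int :=
  (count_fibonac_build a b [0, 1] 0 1 (by omega) (by omega) (by omega)).foldl
    (fun count num => if a ≤ num ∧ num ≤ b then count + 1 else count) 0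

-- ===== PORT B =====
-- B's helper `rank(t)`: scalar loop counting sequence terms ≤ t; invariants for termination.
def cfRank (t x y k : Int)
    (_hx : 0 ≤ x) (hxy : x ≤ y) (hy2 : y ≤ 2 * x + 1) (h1 : 1 ≤ y) : Int :=
  if h : x ≤ t then
    cfRank t y (x + y) (k + 1) (by omega) (by omega) (by omega) (by omega)
  else k
termination_by (3 * t + 2 - (x + y)).toNat
decreasing_by omega

def count_fibonac_alt (a : Int) (b : Int) : Int :=
  if a > b then 0
  else cfRank b 0 1 0 (by omega) (by omega) (by omega) (by omega)
     - cfRank (a - 1) 0 1 0 (by omega) (by omega) (by omega) (by omega)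

-- ===== PRECONDITION & SPEC =====
def Spec_count_fibonac (a : Int) (b : Int) (out : Int) : Prop := out = count_fibonac_alt a b
instance (a : Int) (b : Int) (out : Int) : Decidable (Spec_count_fibonac a b out) := by unfold Spec_count_fibonac; infer_instance

-- ===== CLAIM (what is proved, stated in full; the proofs are below) =====
def Claim_equal_count_fibonac : Prop := ∀ (a : Int) (b : Int), Dom_count_fibonac a b → Spec_count_fibonac a b (count_fibonac a b)

-- ===== LEMMAS AND PROOFS =====

-- Abbreviation for A's counting fold with an arbitrary accumulator.
def cfCount (a b : Int) (l : List Int) (c : Int) : Int :=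
  l.foldl (fun count num => if a ≤ num ∧ num ≤ b then count + 1 else count) c

lemma cfCount_append_singleton (a b : Int) (l : List Int) (v c : Int) :
    cfCount a b (l ++ [v]) c = cfCount a b l c + (if a ≤ v ∧ v ≤ b then 1 else 0) := by
  simp only [cfCount, List.foldl_append, List.foldl_cons, List.foldl_nil]
  split <;> ring

lemma cfCount_empty_range (a b : Int) (hab : b < a) : ∀ (l : List Int) (c : Int), cfCount a b l c = c := by
  intro l
  induction l with
  | nil => intro c; rfl
  | cons v l ih =>
      intro c
      simp only [cfCount, List.foldl_cons] at *
      rw [if_neg (by omega), ih]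

-- cfRank with accumulator k equals k plus cfRank started at 0 (standard acc lemma).
lemma cfRank_acc (t : Int) : ∀ (n : ℕ) (x y k : Int)
    (hx : 0 ≤ x) (hxy : x ≤ y) (hy2 : y ≤ 2 * x + 1) (h1 : 1 ≤ y),
    (3 * t + 2 - (x + y)).toNat = n →
    cfRank t x y k hx hxy hy2 h1 = k + cfRank t x y 0 hx hxy hy2 h1 := by
  intro n
  induction n using Nat.strong_induction_on with
  | _ n ih =>
    intro x y k hx hxy hy2 h1 hn
    conv_lhs => rw [cfRank]
    conv_rhs => rw [cfRank]
    by_cases h : x ≤ t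
    · rw [dif_pos h, dif_pos h]
      rw [ih ((3 * t + 2 - (y + (x + y))).toNat) (by omega) y (x + y) (k + 1)
            (by omega) (by omega) (by omega) (by omega) rfl,
          ih ((3 * t + 2 - (y + (x + y))).toNat) (by omega) y (x + y) (0 + 1)
            (by omega) (by omega) (by omega) (by omega) rfl]
      ring
    · rw [dif_neg h, dif_neg h]; ring

-- Bridge: for a ≤ b, counting A's completed list equals counting the prefix `fib`
-- plus the rank difference over the elements A's loop still appends (starting at x + y).
lemma build_bridge (a b : Int) (hab : a ≤ b) : ∀ (n : ℕ) (fib : List Int) (x y : Int)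
    (hx : 0 ≤ x) (hxy : x ≤ y) (h1 : 1 ≤ y),
    (2 * b + 1 - (x + y)).toNat = n →
    cfCount a b (count_fibonac_build a b fib x y hx hxy h1) 0
      = cfCount a b fib 0
        + cfRank b (x + y) (y + (x + y)) 0 (by omega) (by omega) (by omega) (by omega)
        - cfRank (a - 1) (x + y) (y + (x + y)) 0 (by omega) (by omega) (by omega) (by omega) := by
  intro n
  induction n using Nat.strong_induction_on with
  | _ n ih =>
    intro fib x y hx hxy h1 hn
    rw [count_fibonac_build]
    by_cases h : y ≤ b
    · rw [dif_pos h]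
      rw [ih ((2 * b + 1 - (y + (x + y))).toNat) (by omega) (fib ++ [x + y]) y (x + y)
            (by omega) (by omega) (by omega) rfl]
      rw [cfCount_append_singleton]
      by_cases h2 : x + y ≤ b
      · have hb : cfRank b (x + y) (y + (x + y)) 0 (by omega) (by omega) (by omega) (by omega)
            = 1 + cfRank b (y + (x + y)) (x + y + (y + (x + y))) 0 (by omega) (by omega) (by omega) (by omega) := by
          rw [cfRank, dif_pos h2,
              cfRank_acc b ((3 * b + 2 - (y + (x + y) + (x + y + (y + (x + y))))).toNat)
                (y + (x + y)) (x + y + (y + (x + y))) (0 + 1)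
                (by omega) (by omega) (by omega) (by omega) rfl]
          ring
        rw [hb]
        by_cases h3 : x + y ≤ a - 1
        · have ha : cfRank (a - 1) (x + y) (y + (x + y)) 0 (by omega) (by omega) (by omega) (by omega)
              = 1 + cfRank (a - 1) (y + (x + y)) (x + y + (y + (x + y))) 0 (by omega) (by omega) (by omega) (by omega) := by
            rw [cfRank, dif_pos h3,
                cfRank_acc (a - 1) ((3 * (a - 1) + 2 - (y + (x + y) + (x + y + (y + (x + y))))).toNat)
                  (y + (x + y)) (x + y + (y + (x + y))) (0 + 1)
                  (by omega) (by omega) (by omega) (by omega) rfl]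
            ring
          rw [ha, if_neg (by omega)]
          ring
        · have ha : cfRank (a - 1) (x + y) (y + (x + y)) 0 (by omega) (by omega) (by omega) (by omega) = 0 := by
            rw [cfRank, dif_neg (by omega)]
          have ha' : cfRank (a - 1) (y + (x + y)) (x + y + (y + (x + y))) 0 (by omega) (by omega) (by omega) (by omega) = 0 := by
            rw [cfRank, dif_neg (by omega)]
          rw [ha, ha', if_pos (by omega)]
          ring
      · -- x + y > b ≥ a - 1: appended element not counted; all four ranks are 0
        have hb : cfRank b (x + y) (y + (x + y)) 0 (by omega) (by omega) (by omega) (by omega) = 0 := by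
          rw [cfRank, dif_neg (by omega)]
        have hb' : cfRank b (y + (x + y)) (x + y + (y + (x + y))) 0 (by omega) (by omega) (by omega) (by omega) = 0 := by
          rw [cfRank, dif_neg (by omega)]
        have ha : cfRank (a - 1) (x + y) (y + (x + y)) 0 (by omega) (by omega) (by omega) (by omega) = 0 := by
          rw [cfRank, dif_neg (by omega)]
        have ha' : cfRank (a - 1) (y + (x + y)) (x + y + (y + (x + y))) 0 (by omega) (by omega) (by omega) (by omega) = 0 := by
          rw [cfRank, dif_neg (by omega)]
        rw [hb, hb', ha, ha', if_neg (by omega)]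
        ring
    · rw [dif_neg h]
      -- y > b: both ranks at (x + y, …) stop immediately
      have hz1 : cfRank b (x + y) (y + (x + y)) 0
          (by omega) (by omega) (by omega) (by omega) = 0 := by
        rw [cfRank, dif_neg (by omega)]
      have hz2 : cfRank (a - 1) (x + y) (y + (x + y)) 0
          (by omega) (by omega) (by omega) (by omega) = 0 := by
        rw [cfRank, dif_neg (by omega)]
      rw [hz1, hz2]
      ring

-- ===== VERDICT (by name: the statement is the Claim_ definition above) =====
theorem count_fibonac_spec : Claim_equal_count_fibonac := by
  intro a b _
  show count_fibonac a b = count_fibonac_alt a b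
  unfold count_fibonac count_fibonac_alt
  by_cases hab : a > b
  · rw [if_pos hab]
    exact cfCount_empty_range a b hab _ 0
  · rw [if_neg hab]
    have hab' : a ≤ b := by omega
    rw [show (count_fibonac_build a b [0, 1] 0 1 (by omega) (by omega) (by omega)).foldl
          (fun count num => if a ≤ num ∧ num ≤ b then count + 1 else count) 0
        = cfCount a b (count_fibonac_build a b [0, 1] 0 1 (by omega) (by omega) (by omega)) 0 from rfl]
    rw [build_bridge a b hab' ((2 * b + 1 - (0 + 1)).toNat) [0, 1] 0 1 (by omega) (by omega) (by omega) rfl]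
    have hc : cfCount a b [0, 1] 0
        = (if a ≤ 0 ∧ (0:Int) ≤ b then (1:Int) else 0) + (if a ≤ 1 ∧ (1:Int) ≤ b then 1 else 0) := by
      simp only [cfCount, List.foldl_cons, List.foldl_nil]
      split_ifs <;> omega
    rw [hc]
    by_cases h0 : (0 : Int) ≤ b
    · by_cases h1 : (1 : Int) ≤ b
      · have hb : cfRank b 0 1 0 (by omega) (by omega) (by omega) (by omega)
            = 2 + cfRank b (0 + 1) (1 + (0 + 1)) 0 (by omega) (by omega) (by omega) (by omega) := by
          rw [cfRank, dif_pos h0, cfRank, dif_pos (by omega : (1:Int) ≤ b),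
              cfRank_acc b ((3 * b + 2 - (0 + 1 + (1 + (0 + 1)))).toNat) (0 + 1) (1 + (0 + 1))
                (0 + 1 + 1) (by omega) (by omega) (by omega) (by omega) rfl]
          ring
        rw [hb]
        by_cases ha1 : (2 : Int) ≤ a
        · have ha : cfRank (a - 1) 0 1 0 (by omega) (by omega) (by omega) (by omega)
              = 2 + cfRank (a - 1) (0 + 1) (1 + (0 + 1)) 0 (by omega) (by omega) (by omega) (by omega) := by
            rw [cfRank, dif_pos (by omega), cfRank, dif_pos (by omega),
                cfRank_acc (a - 1) ((3 * (a - 1) + 2 - (0 + 1 + (1 + (0 + 1)))).toNat) (0 + 1) (1 + (0 + 1))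
                  (0 + 1 + 1) (by omega) (by omega) (by omega) (by omega) rfl]
            ring
          rw [ha, if_neg (by omega), if_neg (by omega)]
          ring
        · by_cases ha0 : a = 1
          · have ha : cfRank (a - 1) 0 1 0 (by omega) (by omega) (by omega) (by omega) = 1 := by
              rw [cfRank, dif_pos (by omega), cfRank, dif_neg (by omega)]
              norm_num
            have ha' : cfRank (a - 1) (0 + 1) (1 + (0 + 1)) 0 (by omega) (by omega) (by omega) (by omega) = 0 := by
              rw [cfRank, dif_neg (by omega)]
            rw [ha, ha', if_neg (by omega), if_pos (by omega)]
            ring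
          · -- a ≤ 0
            have ha : cfRank (a - 1) 0 1 0 (by omega) (by omega) (by omega) (by omega) = 0 := by
              rw [cfRank, dif_neg (by omega)]
            have ha' : cfRank (a - 1) (0 + 1) (1 + (0 + 1)) 0 (by omega) (by omega) (by omega) (by omega) = 0 := by
              rw [cfRank, dif_neg (by omega)]
            rw [ha, ha', if_pos (by omega), if_pos (by omega)]
            ring
      · -- b = 0, hence a ≤ 0
        have hb : cfRank b 0 1 0 (by omega) (by omega) (by omega) (by omega) = 1 := by
          rw [cfRank, dif_pos h0, cfRank, dif_neg (by omega)]
          norm_num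
        have hb' : cfRank b (0 + 1) (1 + (0 + 1)) 0 (by omega) (by omega) (by omega) (by omega) = 0 := by
          rw [cfRank, dif_neg (by omega)]
        have ha : cfRank (a - 1) 0 1 0 (by omega) (by omega) (by omega) (by omega) = 0 := by
          rw [cfRank, dif_neg (by omega)]
        have ha' : cfRank (a - 1) (0 + 1) (1 + (0 + 1)) 0 (by omega) (by omega) (by omega) (by omega) = 0 := by
          rw [cfRank, dif_neg (by omega)]
        rw [hb, hb', ha, ha', if_pos (by omega), if_neg (by omega)]
        ring
    · -- b < 0 (and a ≤ b): every rank is 0 and nothing is counted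
      have hb : cfRank b 0 1 0 (by omega) (by omega) (by omega) (by omega) = 0 := by
        rw [cfRank, dif_neg (by omega)]
      have hb' : cfRank b (0 + 1) (1 + (0 + 1)) 0 (by omega) (by omega) (by omega) (by omega) = 0 := by
        rw [cfRank, dif_neg (by omega)]
      have ha : cfRank (a - 1) 0 1 0 (by omega) (by omega) (by omega) (by omega) = 0 := by
        rw [cfRank, dif_neg (by omega)]
      have ha' : cfRank (a - 1) (0 + 1) (1 + (0 + 1)) 0 (by omega) (by omega) (by omega) (by omega) = 0 := by
        rw [cfRank, dif_neg (by omega)]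
      rw [hb, hb', ha, ha', if_neg (by omega), if_neg (by omega)]
      ring
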